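-- pv_equiv track=rewrite | github.com/dullfig/relay | relaydsl/opt/diode_opt.py | is_monotone_positive
-- ===== SOURCE A (Python) =====
-- def is_monotone_positive(truth_table: dict[tuple[int, ...], int],
--                           var_index: int) -> bool:
--     """
--     Check if a function is monotone increasing in a variable.
--     f(x=0) <= f(x=1) for all other variable assignments.
--     """
--     n = len(next(iter(truth_table.keys())))
--     for bits, val in truth_table.items():
--         if bits[var_index] == 0:
--             # Find the corresponding row with this var = 1
--             bits_1 = list(bits)
--             bits_1[var_index] = 1
--             val_1 = truth_table.get(tuple(bits_1), 0)
--             if val > val_1:  # f(x=0) > f(x=1) means NOT monotone positive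
--                 return False
--     return True
-- ===== SOURCE B (Python) =====
-- def is_monotone_positive(truth_table: dict[tuple[int, ...], int],
--                           var_index: int) -> bool:
--     """
--     Check if a function is monotone increasing in a variable.
--     f(x=0) <= f(x=1) for all other variable assignments.
--     """
--     # Pair each row with its partner: group rows under the assignment
--     # obtained by forcing the variable to 1, then compare within each group.
--     groups = {}
--     for bits, val in truth_table.items():
--         b = bits[var_index]
--         key = list(bits)
--         key[var_index] = 1
--         groups.setdefault(tuple(key), {})[b] = val
--     for g in groups.values():
--         if 0 in g and g[0] > g.get(1, 0):
--             return False
--     return True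
-- ===== Notes on version B (the rewrite author's own statement) =====
-- stated objective: alternative
-- what changed: B replaces A's per-row lookup of the var=1 counterpart in the full table by a build-then-scan: one grouping pass keyed on the row with the variable forced to 1, then one scan over the groups comparing the var=0 and var=1 entries; …
-- outside the precondition, e.g. on is_monotone_positive({(0, 0): 1, (0,): 0}, 1): A returns False, B raises IndexError
import Mathlib
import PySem

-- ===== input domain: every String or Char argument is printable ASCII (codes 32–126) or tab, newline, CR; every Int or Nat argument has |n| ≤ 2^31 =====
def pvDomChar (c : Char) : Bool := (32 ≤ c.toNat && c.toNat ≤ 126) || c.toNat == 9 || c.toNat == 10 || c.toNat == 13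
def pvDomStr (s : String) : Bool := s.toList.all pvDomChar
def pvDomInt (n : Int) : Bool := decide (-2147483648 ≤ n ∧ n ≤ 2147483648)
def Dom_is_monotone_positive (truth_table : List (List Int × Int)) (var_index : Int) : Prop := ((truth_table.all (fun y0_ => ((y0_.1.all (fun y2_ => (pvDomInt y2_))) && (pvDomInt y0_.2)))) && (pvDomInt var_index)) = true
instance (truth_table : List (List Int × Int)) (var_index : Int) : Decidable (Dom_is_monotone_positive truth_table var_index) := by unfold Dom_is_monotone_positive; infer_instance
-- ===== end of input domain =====

-- B replaces A's per-row lookup of the var=1 counterpart in the whole table by a build-then-scan: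
-- one grouping pass keyed on the row with the variable forced to 1, then one scan over the groups;
-- same return value on Pre_.

-- ===== PORT A =====
-- the loop 'for bits, val in truth_table.items(): …' of A; the lookup truth_table.get(tuple(bits_1), 0)
-- is first-match on the association list, exactly Python's dict lookup (keys are unique under Pre_).
def pvALoop (truth_table : List (List Int × Int)) (var_index : Int) : List (List Int × Int) → Bool
  | [] => true
  | (bits, val) :: rest =>
    match PySem.List.pyGet? bits var_index with
    | none => pvALoop truth_table var_index rest   -- bits[var_index] raises IndexError in Python: outside Pre_, any value is fine
    | some b =>
      if b = 0 then
        let val_1 := (PySem.Dict.mk truth_table).getD (PySem.List.pySetD bits var_index 1) 0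
        if val_1 < val then false else pvALoop truth_table var_index rest
      else pvALoop truth_table var_index rest

-- 'n = len(next(iter(truth_table.keys())))' only raises StopIteration on an empty table (outside Pre_);
-- n itself is unused by A, so the port is the loop alone.
def is_monotone_positive (truth_table : List (List Int × Int)) (var_index : Int) : Bool :=
  pvALoop truth_table var_index truth_table

-- ===== PORT B =====
-- Source B's grouping pass: 'b = bits[var_index]; key = list(bits); key[var_index] = 1;
-- groups.setdefault(tuple(key), {})[b] = val'
def pvBuild (truth_table : List (List Int × Int)) (var_index : Int) :
    PySem.Dict (List Int) (PySem.Dict Int Int) :=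
  truth_table.foldl (fun d p =>
    match PySem.List.pyGet? p.1 var_index with
    | none => d   -- 'b = bits[var_index]' raises IndexError here: outside Pre_ (the row is skipped)
    | some b =>
      d.modify (PySem.List.pySetD p.1 var_index 1) PySem.Dict.empty
        (fun g => g.insert b p.2)) PySem.Dict.empty

-- Source B's scan 'for g in groups.values(): if 0 in g and g[0] > g.get(1, 0): return False' / 'return True'
def is_monotone_positive_alt (truth_table : List (List Int × Int)) (var_index : Int) : Bool :=
  (pvBuild truth_table var_index).values.all
    (fun g => !(g.contains 0 && decide (g.getD 1 0 < g.getD 0 0)))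

-- ===== PRECONDITION & SPEC =====
-- Pre_ excludes: (a) the empty table, on which A raises StopIteration; (b) tables where some row's
-- bits[var_index] is out of range — there A raises IndexError unless it early-returns False on an
-- earlier row, while B always raises IndexError in its build pass (see claim cites); (c) duplicate
-- keys in the association list, which no Python dict can contain (they correspond to no Python input).
def Pre_is_monotone_positive (truth_table : List (List Int × Int)) (var_index : Int) : Prop :=
  truth_table ≠ [] ∧ (∀ p ∈ truth_table, PySem.Raise.InRange p.1.length var_index) ∧
    (truth_table.map Prod.fst).Nodup
instance (truth_table : List (List Int × Int)) (var_index : Int) : Decidable (Pre_is_monotone_positive truth_table var_index) := by unfold Pre_is_monotone_positive; infer_instance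

def pvWitness_is_monotone_positive : (List (List Int × Int)) × Int :=
  ([([0, 0], 0), ([0, 1], 1), ([1, 0], 0), ([1, 1], 1)], 0)

def Spec_is_monotone_positive (truth_table : List (List Int × Int)) (var_index : Int) (out : Bool) : Prop := out = is_monotone_positive_alt truth_table var_index
instance (truth_table : List (List Int × Int)) (var_index : Int) (out : Bool) : Decidable (Spec_is_monotone_positive truth_table var_index out) := by unfold Spec_is_monotone_positive; infer_instance

-- ===== CLAIM (what is proved, stated in full; the proofs are below) =====
def Claim_equal_is_monotone_positive : Prop := ∀ (truth_table : List (List Int × Int)) (var_index : Int), Dom_is_monotone_positive truth_table var_index → Pre_is_monotone_positive truth_table var_index → Spec_is_monotone_positive truth_table var_index (is_monotone_positive truth_table var_index)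

-- ===== LEMMAS AND PROOFS =====

-- the check A performs on one row (against the fixed full table)
def pvRowOK (truth_table : List (List Int × Int)) (var_index : Int) (p : List Int × Int) : Bool :=
  match PySem.List.pyGet? p.1 var_index with
  | none => true
  | some b =>
    if b = 0 then
      !decide ((PySem.Dict.mk truth_table).getD (PySem.List.pySetD p.1 var_index 1) 0 < p.2)
    else true

-- proof-side views of a row: its group key (the row with the variable forced to 1) and its bit
def pvKey (var_index : Int) (p : List Int × Int) : List Int := PySem.List.pySetD p.1 var_index 1
def pvBit (var_index : Int) (p : List Int × Int) : Int := PySem.List.pyGetD p.1 var_index 0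
-- the group B builds for key m, written directly as a dict literal
def pvGrp (truth_table : List (List Int × Int)) (var_index : Int) (m : List Int) :
    PySem.Dict Int Int :=
  PySem.Dict.mk (((truth_table.filter (fun p => pvKey var_index p = m)).map
    (fun p => (pvBit var_index p, p.2))))

-- the wrapped index
def pvRowIdx (bits : List Int) (var_index : Int) : Int :=
  if 0 ≤ var_index then var_index else var_index + bits.length

lemma pvALoop_eq_all (tt : List (List Int × Int)) (v : Int) (rows : List (List Int × Int)) :
    pvALoop tt v rows = rows.all (pvRowOK tt v) := by
  induction rows with
  | nil => rfl
  | cons p rest ih =>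
    obtain ⟨bits, val⟩ := p
    simp only [pvALoop, List.all_cons, pvRowOK]
    cases PySem.List.pyGet? bits v with
    | none => simp [ih]
    | some b =>
      by_cases hb : b = 0
      · simp only [hb]
        by_cases hlt : (PySem.Dict.mk tt).getD (PySem.List.pySetD bits v 1) 0 < val
        · simp [hlt]
        · simp [hlt, ih]
      · simp [hb, ih]

lemma pvIdx_spec (n : Nat) (v : Int) (h : PySem.Raise.InRange n v) :
    PySem.List.pyIdx? n v = some (if 0 ≤ v then v else v + n).toNat := by
  obtain ⟨h1, h2⟩ := h
  simp only [PySem.List.pyIdx?]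
  split_ifs <;> first | (simp_all; omega) | simp_all

lemma pvRowIdx_bounds (bits : List Int) (v : Int) (h : PySem.Raise.InRange bits.length v) :
    0 ≤ pvRowIdx bits v ∧ pvRowIdx bits v < (bits.length : Int) := by
  obtain ⟨h1, h2⟩ := h; unfold pvRowIdx; split_ifs <;> omega

lemma pvGet_eq (bits : List Int) (v : Int) (h : PySem.Raise.InRange bits.length v) :
    PySem.List.pyGet? bits v = bits[(pvRowIdx bits v).toNat]? := by
  simp only [PySem.List.pyGet?, pvIdx_spec _ _ h, Option.bind_some, pvRowIdx]

lemma pvSet_eq (bits : List Int) (v b : Int) (h : PySem.Raise.InRange bits.length v) :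
    PySem.List.pySetD bits v b = bits.set (pvRowIdx bits v).toNat b := by
  simp only [PySem.List.pySetD, PySem.List.pySet?, pvIdx_spec _ _ h, Option.map_some,
    Option.getD_some, pvRowIdx]

lemma pvKn_lt (bits : List Int) (v : Int) (h : PySem.Raise.InRange bits.length v) :
    (pvRowIdx bits v).toNat < bits.length := by
  have := pvRowIdx_bounds bits v h; omega

-- the bit read by 'bits[var_index]' is the element at the wrapped index
lemma pvBit_eq (v : Int) (p : List Int × Int) (h : PySem.Raise.InRange p.1.length v) :
    pvBit v p = p.1[(pvRowIdx p.1 v).toNat]'(pvKn_lt p.1 v h) := by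
  have hk := pvKn_lt p.1 v h
  rw [pvBit, PySem.List.pyGetD, pvGet_eq p.1 v h, List.getElem?_eq_getElem hk, Option.getD_some]

lemma pvGet?_eq_some_bit (v : Int) (p : List Int × Int)
    (h : PySem.Raise.InRange p.1.length v) :
    PySem.List.pyGet? p.1 v = some (pvBit v p) := by
  rw [pvGet_eq p.1 v h, pvBit_eq v p h, List.getElem?_eq_getElem (pvKn_lt p.1 v h)]

-- keys have the same length as their rows; rows with keys of the same length share the wrapped index
lemma pvKey_length (v : Int) (p : List Int × Int) (h : PySem.Raise.InRange p.1.length v) :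
    (pvKey v p).length = p.1.length := by
  rw [pvKey, pvSet_eq p.1 v 1 h, List.length_set]

lemma pvRowIdx_of_len_eq (v : Int) (p q : List Int × Int)
    (hlen : p.1.length = q.1.length) : pvRowIdx p.1 v = pvRowIdx q.1 v := by
  unfold pvRowIdx; rw [hlen]

-- (key, bit) determines the full row: set the variable back to its bit
lemma pvRecon (v : Int) (p : List Int × Int) (h : PySem.Raise.InRange p.1.length v) :
    p.1 = (pvKey v p).set (pvRowIdx p.1 v).toNat (pvBit v p) := by
  rw [pvKey, pvSet_eq p.1 v 1 h, List.set_set, pvBit_eq v p h, List.set_getElem_self]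

lemma pvInj (v : Int) (p q : List Int × Int)
    (hp : PySem.Raise.InRange p.1.length v) (hq : PySem.Raise.InRange q.1.length v)
    (hkey : pvKey v p = pvKey v q) (hbit : pvBit v p = pvBit v q) : p.1 = q.1 := by
  have hlen : p.1.length = q.1.length := by
    rw [← pvKey_length v p hp, ← pvKey_length v q hq, hkey]
  have hkk : pvRowIdx p.1 v = pvRowIdx q.1 v := pvRowIdx_of_len_eq v p q hlen
  rw [pvRecon v p hp, pvRecon v q hq, hkey, hbit, hkk]

-- membership of a full key: q.1 equals p.1 with the variable set to 1 iff q is in p's group with bit 1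
lemma pvSet_mem_iff (v : Int) (p q : List Int × Int)
    (hp : PySem.Raise.InRange p.1.length v) (hq : PySem.Raise.InRange q.1.length v) :
    q.1 = PySem.List.pySetD p.1 v 1 ↔ (pvKey v q = pvKey v p ∧ pvBit v q = 1) := by
  have hkp := pvKn_lt p.1 v hp
  have hkq := pvKn_lt q.1 v hq
  constructor
  · intro h1
    have h2 : q.1 = p.1.set (pvRowIdx p.1 v).toNat 1 := by rw [h1, pvSet_eq p.1 v 1 hp]
    have hlen : q.1.length = p.1.length := by rw [h2, List.length_set]
    have hkk : pvRowIdx q.1 v = pvRowIdx p.1 v := pvRowIdx_of_len_eq v q p hlen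
    have hbit : pvBit v q = 1 := by
      rw [pvBit_eq v q hq]
      simp only [hkk]
      simp only [h2]
      rw [List.getElem_set_self]
    refine ⟨?_, hbit⟩
    rw [pvKey, pvKey, pvSet_eq q.1 v 1 hq, pvSet_eq p.1 v 1 hp, hkk, h2, List.set_set]
  · rintro ⟨hkey, hbit⟩
    have hself : q.1.set (pvRowIdx q.1 v).toNat (pvBit v q) = q.1 := by
      conv_lhs => rw [pvBit_eq v q hq]
      exact List.set_getElem_self (pvKn_lt q.1 v hq)
    calc q.1 = q.1.set (pvRowIdx q.1 v).toNat (pvBit v q) := hself.symm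
      _ = q.1.set (pvRowIdx q.1 v).toNat 1 := by rw [hbit]
      _ = pvKey v q := by rw [pvKey, pvSet_eq q.1 v 1 hq]
      _ = pvKey v p := hkey
      _ = PySem.List.pySetD p.1 v 1 := rfl

lemma pv_find?_congr {α : Type} (l : List α) (p q : α → Bool) (h : ∀ a ∈ l, p a = q a) :
    l.find? p = l.find? q := by
  induction l with
  | nil => rfl
  | cons x t ih =>
    have hx := h x (by simp)
    simp only [List.find?_cons, hx]
    cases q x <;> simp [ih fun a ha => h a (by simp [ha])]

lemma pv_find?_filter {α : Type} (l : List α) (p q : α → Bool) :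
    (l.filter p).find? q = l.find? (fun a => p a && q a) := by
  induction l with
  | nil => rfl
  | cons x t ih => by_cases hp : p x <;> by_cases hq : q x <;> simp [hp, hq, ih]

lemma pv_getD_foldl_modify {κ ν β : Type} [BEq κ] [LawfulBEq κ] [DecidableEq κ]
    (l : List β) (key : β → κ) (f : β → ν → ν) (d0 : ν) (d : PySem.Dict κ ν) (m : κ) :
    (l.foldl (fun d a => d.modify (key a) d0 (f a)) d).getD m d0
      = (l.filter (fun a => key a = m)).foldl (fun acc a => f a acc) (d.getD m d0) := by
  induction l generalizing d with
  | nil => rfl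
  | cons x t ih =>
    simp only [List.foldl_cons, ih, List.filter_cons]
    by_cases hx : key x = m
    · simp [hx]
    · simp [hx, PySem.Dict.getD_modify, Ne.symm hx]

-- under Pre_, B's build pass is the unguarded grouping fold
lemma pvBuild_eq (tt : List (List Int × Int)) (v : Int)
    (hv : ∀ p ∈ tt, PySem.Raise.InRange p.1.length v) :
    pvBuild tt v = tt.foldl
      (fun d p => d.modify (pvKey v p) PySem.Dict.empty (fun g => g.insert (pvBit v p) p.2))
      PySem.Dict.empty := by
  unfold pvBuild
  refine PySem.List.foldl_congr_mem _ _ _ _ (fun d p hp => ?_)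
  rw [pvGet?_eq_some_bit v p (hv p hp)]
  rfl

-- the group B ends with at key m, under Pre_
lemma pvBuild_getD (tt : List (List Int × Int)) (v : Int)
    (hv : ∀ p ∈ tt, PySem.Raise.InRange p.1.length v)
    (hnd : (tt.map Prod.fst).Nodup) (m : List Int) :
    (pvBuild tt v).getD m PySem.Dict.empty = pvGrp tt v m := by
  rw [pvBuild_eq tt v hv,
    pv_getD_foldl_modify tt (pvKey v) (fun p g => g.insert (pvBit v p) p.2)
      PySem.Dict.empty PySem.Dict.empty m,
    PySem.Dict.getD_empty]
  have hfresh : ∀ p ∈ tt.filter (fun p => pvKey v p = m),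
      (PySem.Dict.empty : PySem.Dict Int Int).contains (pvBit v p) = false := fun p _ =>
    PySem.Dict.contains_empty _
  have hndf : ((tt.filter (fun p => pvKey v p = m)).map (pvBit v)).Nodup := by
    apply (List.nodup_map_iff_inj_on ((List.Nodup.of_map _ hnd).filter _)).mpr
    intro p hpf q hqf hbit
    have hp := List.mem_of_mem_filter hpf
    have hq := List.mem_of_mem_filter hqf
    have hkp : pvKey v p = m := by simpa using (List.of_mem_filter hpf)
    have hkq : pvKey v q = m := by simpa using (List.of_mem_filter hqf)
    exact List.inj_on_of_nodup_map hnd hp hq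
      (pvInj v p q (hv p hp) (hv q hq) (hkp.trans hkq.symm) hbit)
  apply PySem.Dict.ext
  rw [PySem.Dict.items_foldl_insert_fresh _ _ _ _ hfresh hndf]
  simp [pvGrp, PySem.Dict.empty]

lemma pvGrp_get? (tt : List (List Int × Int)) (v : Int) (m : List Int) (x : Int) :
    (pvGrp tt v m).get? x
      = ((tt.filter (fun p => pvKey v p = m)).find? (fun p => pvBit v p == x)).map Prod.snd := by
  simp [pvGrp, PySem.Dict.get?, List.find?_map, Function.comp_def, Option.map_map]

-- A's table lookup of bits_1 is exactly B's group lookup of bit 1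
lemma pvLookup_bridge (tt : List (List Int × Int)) (v : Int)
    (hv : ∀ p ∈ tt, PySem.Raise.InRange p.1.length v) (p : List Int × Int) (hp : p ∈ tt) :
    (PySem.Dict.mk tt).get? (PySem.List.pySetD p.1 v 1)
      = (pvGrp tt v (pvKey v p)).get? 1 := by
  rw [pvGrp_get?, pv_find?_filter]
  simp only [PySem.Dict.get?]
  congr 1
  apply pv_find?_congr
  intro q hq
  have hiff := pvSet_mem_iff v p q (hv p hp) (hv q hq)
  rw [Bool.eq_iff_iff]
  simp [hiff]

-- ===== VERDICT (by name: the statement is the Claim_ definition above) =====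
theorem is_monotone_positive_spec : Claim_equal_is_monotone_positive := by
  intro tt v _hdom hpre
  obtain ⟨hne, hv, hnd⟩ := hpre
  unfold Spec_is_monotone_positive
  rw [is_monotone_positive, is_monotone_positive_alt, pvALoop_eq_all]
  have hbld := pvBuild_eq tt v hv
  have hndk : (pvBuild tt v).keys.Nodup := by
    rw [hbld]
    exact PySem.Dict.nodup_keys_foldl_modify_key _ _ _ _ _
      (by rw [PySem.Dict.keys_empty]; exact List.nodup_nil)
  rw [PySem.Dict.values_eq_map_keys _ hndk PySem.Dict.empty, List.all_map]
  simp only [Function.comp_def, pvBuild_getD tt v hv hnd]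
  have hkeys : ∀ m, m ∈ (pvBuild tt v).keys ↔ ∃ p ∈ tt, pvKey v p = m := by
    intro m
    rw [hbld, PySem.Dict.keys_foldl_modify_key, PySem.Set.mem_update]
    simp [PySem.Dict.keys_empty, eq_comm]
  rw [Bool.eq_iff_iff, List.all_eq_true, List.all_eq_true]
  constructor
  · intro hall m hm
    obtain ⟨p, hp, rfl⟩ := (hkeys m).mp hm
    by_cases hc : (pvGrp tt v (pvKey v p)).contains 0
    · have hsome : ((pvGrp tt v (pvKey v p)).get? 0).isSome := by
        rw [← PySem.Dict.contains_eq_isSome_get?]; exact hc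
      obtain ⟨w, hw⟩ := Option.isSome_iff_exists.mp hsome
      rw [pvGrp_get?] at hw
      obtain ⟨p0, hfind, hw2⟩ := Option.map_eq_some_iff.mp hw
      have hp0f := List.mem_of_find?_eq_some hfind
      have hp0bit : pvBit v p0 = 0 := by simpa using List.find?_some hfind
      have hp0tt := List.mem_of_mem_filter hp0f
      have hp0key : pvKey v p0 = pvKey v p := by simpa using List.of_mem_filter hp0f
      have hrow := hall p0 hp0tt
      simp only [pvRowOK, pvGet?_eq_some_bit v p0 (hv p0 hp0tt), hp0bit] at hrow
      simp at hrow
      have hq0 : (pvGrp tt v (pvKey v p)).get? 0 = some p0.2 := by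
        rw [pvGrp_get?, hfind]; rfl
      have hg0 : (pvGrp tt v (pvKey v p)).getD 0 0 = p0.2 := by
        rw [PySem.Dict.getD_eq_get?_getD, hq0]; rfl
      have hbr := pvLookup_bridge tt v hv p0 hp0tt
      rw [hp0key] at hbr
      have hle : ¬ ((pvGrp tt v (pvKey v p)).getD 1 0 < (pvGrp tt v (pvKey v p)).getD 0 0) := by
        rw [hg0, PySem.Dict.getD_eq_get?_getD, ← hbr, ← PySem.Dict.getD_eq_get?_getD]
        omega
      simp [hle]
    · simp [hc]
  · intro hall p hp
    simp only [pvRowOK, pvGet?_eq_some_bit v p (hv p hp)]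
    by_cases hb : pvBit v p = 0
    · have hm : pvKey v p ∈ (pvBuild tt v).keys := (hkeys _).mpr ⟨p, hp, rfl⟩
      have hchk := hall _ hm
      have hq0 : (pvGrp tt v (pvKey v p)).get? 0 = some p.2 := by
        rw [pvGrp_get?]
        have hmem : p ∈ tt.filter (fun q => pvKey v q = pvKey v p) :=
          List.mem_filter.mpr ⟨hp, by simp⟩
        have hsome : (List.find? (fun q => pvBit v q == 0)
            (tt.filter (fun q => pvKey v q = pvKey v p))).isSome :=
          List.find?_isSome.mpr ⟨p, hmem, by simp [hb]⟩
        obtain ⟨p0, hfind⟩ := Option.isSome_iff_exists.mp hsome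
        have hp0f := List.mem_of_find?_eq_some hfind
        have hp0bit : pvBit v p0 = 0 := by simpa using List.find?_some hfind
        have hp0tt := List.mem_of_mem_filter hp0f
        have hp0key : pvKey v p0 = pvKey v p := by simpa using List.of_mem_filter hp0f
        have hpp : p0 = p := List.inj_on_of_nodup_map hnd hp0tt hp
          (pvInj v p0 p (hv p0 hp0tt) (hv p hp) hp0key (by rw [hp0bit, hb]))
        rw [hfind, hpp]; rfl
      have hc : (pvGrp tt v (pvKey v p)).contains 0 = true := by
        rw [PySem.Dict.contains_eq_isSome_get?, hq0]; rfl
      rw [hc] at hchk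
      simp only [Bool.true_and, Bool.not_eq_eq_eq_not, Bool.not_true,
        decide_eq_false_iff_not] at hchk
      have hg0 : (pvGrp tt v (pvKey v p)).getD 0 0 = p.2 := by
        rw [PySem.Dict.getD_eq_get?_getD, hq0]; rfl
      have hbr := pvLookup_bridge tt v hv p hp
      have htbl : (PySem.Dict.mk tt).getD (PySem.List.pySetD p.1 v 1) 0
          = (pvGrp tt v (pvKey v p)).getD 1 0 := by
        rw [PySem.Dict.getD_eq_get?_getD, hbr, ← PySem.Dict.getD_eq_get?_getD]
      rw [hg0] at hchk
      simp [hb, htbl, hchk]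
    · simp [hb]
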